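-- pv_equiv track=rewrite | github.com/eneo-ai/eneo | backend/src/intric/integration/infrastructure/content_service/sharepoint_content_service.py | _unsupported_file_reason
-- ===== SOURCE A (Python) =====
-- from typing import TYPE_CHECKING, Any, Dict, List, Optional, Tuple
--
-- _UNSUPPORTED_EXTENSIONS: frozenset[str] = frozenset({
--     # Images
--     ".jpg", ".jpeg", ".png", ".gif", ".bmp", ".svg", ".ico", ".webp", ".tiff", ".tif",
--     ".heic", ".heif", ".raw", ".cr2", ".nef", ".arw", ".psd",
--     # Video
--     ".mp4", ".avi", ".mov", ".wmv", ".mkv", ".webm", ".flv", ".m4v",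
--     # Audio
--     ".mp3", ".wav", ".ogg", ".flac", ".aac", ".wma", ".m4a",
--     # Archives
--     ".zip", ".rar", ".7z", ".tar", ".gz", ".bz2",
--     # Executables / binaries
--     ".exe", ".dll", ".msi", ".bin", ".iso",
--     # Other non-text
--     ".ttf", ".otf", ".woff", ".woff2",
-- })
--
-- def _unsupported_file_reason(filename: str) -> Optional[str]:
--     """Return a skip reason if the file type is unsupported, or None if OK."""
--     name = filename.lower()
--     for ext in _UNSUPPORTED_EXTENSIONS:
--         if name.endswith(ext):
--             # Determine a human-readable category
--             if ext in {".jpg", ".jpeg", ".png", ".gif", ".bmp", ".svg", ".ico", ".webp", ".tiff", ".tif",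
--                        ".heic", ".heif", ".raw", ".cr2", ".nef", ".arw", ".psd"}:
--                 return "Unsupported file type (image)"
--             if ext in {".mp4", ".avi", ".mov", ".wmv", ".mkv", ".webm", ".flv", ".m4v"}:
--                 return "Unsupported file type (video)"
--             if ext in {".mp3", ".wav", ".ogg", ".flac", ".aac", ".wma", ".m4a"}:
--                 return "Unsupported file type (audio)"
--             return f"Unsupported file type ({ext})"
--     return None
-- ===== SOURCE B (Python) =====
-- _SKIP_REASONS = {
--     ".jpg": "Unsupported file type (image)",
--     ".jpeg": "Unsupported file type (image)",
--     ".png": "Unsupported file type (image)",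
--     ".gif": "Unsupported file type (image)",
--     ".bmp": "Unsupported file type (image)",
--     ".svg": "Unsupported file type (image)",
--     ".ico": "Unsupported file type (image)",
--     ".webp": "Unsupported file type (image)",
--     ".tiff": "Unsupported file type (image)",
--     ".tif": "Unsupported file type (image)",
--     ".heic": "Unsupported file type (image)",
--     ".heif": "Unsupported file type (image)",
--     ".raw": "Unsupported file type (image)",
--     ".cr2": "Unsupported file type (image)",
--     ".nef": "Unsupported file type (image)",
--     ".arw": "Unsupported file type (image)",
--     ".psd": "Unsupported file type (image)",
--     ".mp4": "Unsupported file type (video)",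
--     ".avi": "Unsupported file type (video)",
--     ".mov": "Unsupported file type (video)",
--     ".wmv": "Unsupported file type (video)",
--     ".mkv": "Unsupported file type (video)",
--     ".webm": "Unsupported file type (video)",
--     ".flv": "Unsupported file type (video)",
--     ".m4v": "Unsupported file type (video)",
--     ".mp3": "Unsupported file type (audio)",
--     ".wav": "Unsupported file type (audio)",
--     ".ogg": "Unsupported file type (audio)",
--     ".flac": "Unsupported file type (audio)",
--     ".aac": "Unsupported file type (audio)",
--     ".wma": "Unsupported file type (audio)",
--     ".m4a": "Unsupported file type (audio)",
--     ".zip": "Unsupported file type (.zip)",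
--     ".rar": "Unsupported file type (.rar)",
--     ".7z": "Unsupported file type (.7z)",
--     ".tar": "Unsupported file type (.tar)",
--     ".gz": "Unsupported file type (.gz)",
--     ".bz2": "Unsupported file type (.bz2)",
--     ".exe": "Unsupported file type (.exe)",
--     ".dll": "Unsupported file type (.dll)",
--     ".msi": "Unsupported file type (.msi)",
--     ".bin": "Unsupported file type (.bin)",
--     ".iso": "Unsupported file type (.iso)",
--     ".ttf": "Unsupported file type (.ttf)",
--     ".otf": "Unsupported file type (.otf)",
--     ".woff": "Unsupported file type (.woff)",
--     ".woff2": "Unsupported file type (.woff2)",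
-- }
--
--
-- def _unsupported_file_reason(filename):
--     """Return a skip reason if the file type is unsupported, or None if OK."""
--     name = filename.lower()
--     i = name.rfind(".")
--     if i < 0:
--         return None
--     return _SKIP_REASONS.get(name[i:])
-- ===== Notes on version B (the rewrite author's own statement) =====
-- stated objective: idiomatic
-- what changed: Replaces the loop over all 48 extensions with nested set-membership category tests by a module-level flat extension-to-reason dict literal: lowercase once, extract the last-dot suffix with rfind, and do a single dict .get lookup.
import Mathlib
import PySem

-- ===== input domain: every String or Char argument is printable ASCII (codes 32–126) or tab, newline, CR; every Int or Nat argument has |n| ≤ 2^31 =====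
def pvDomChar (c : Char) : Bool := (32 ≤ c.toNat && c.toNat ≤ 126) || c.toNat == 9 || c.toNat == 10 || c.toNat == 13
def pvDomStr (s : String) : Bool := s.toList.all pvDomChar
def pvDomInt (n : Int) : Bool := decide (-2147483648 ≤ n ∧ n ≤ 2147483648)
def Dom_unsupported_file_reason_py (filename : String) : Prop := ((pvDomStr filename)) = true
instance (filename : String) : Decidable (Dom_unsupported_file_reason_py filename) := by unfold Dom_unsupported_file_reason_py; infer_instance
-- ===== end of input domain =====

-- B replaces A's loop over all 48 extensions (with nested membership tests) by one
-- last-dot extraction (rfind) plus a single lookup in a flat extension→reason dict literal (idiomatic).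


-- ===== PORT A =====
-- the frozenset's iteration order is a CPython hash artifact; at most one extension
-- can match a given name (no listed extension is a suffix of another), so the loop's
-- result is order-independent — the port iterates in source order.
def pvImageSet : List String := [".jpg", ".jpeg", ".png", ".gif", ".bmp", ".svg", ".ico", ".webp", ".tiff", ".tif", ".heic", ".heif", ".raw", ".cr2", ".nef", ".arw", ".psd"]
def pvVideoSet : List String := [".mp4", ".avi", ".mov", ".wmv", ".mkv", ".webm", ".flv", ".m4v"]
def pvAudioSet : List String := [".mp3", ".wav", ".ogg", ".flac", ".aac", ".wma", ".m4a"]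
def pvUnsupportedExtensions : List String :=
  pvImageSet ++ pvVideoSet ++ pvAudioSet ++
  [".zip", ".rar", ".7z", ".tar", ".gz", ".bz2",
   ".exe", ".dll", ".msi", ".bin", ".iso",
   ".ttf", ".otf", ".woff", ".woff2"]

def pvCategory (ext : String) : String :=
  if pvImageSet.contains ext then "Unsupported file type (image)"
  else if pvVideoSet.contains ext then "Unsupported file type (video)"
  else if pvAudioSet.contains ext then "Unsupported file type (audio)"
  else "Unsupported file type (" ++ ext ++ ")"

def pvScanA (name : String) : List String → Option String
  | [] => none
  | ext :: rest => if PySem.Str.endswith name ext then some (pvCategory ext) else pvScanA name rest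

def unsupported_file_reason_py (filename : String) : Option String :=
  pvScanA (PySem.Str.lower filename) pvUnsupportedExtensions

-- ===== PORT B =====
-- Source B's module-level dict literal, verbatim: one flat association list of 48 pairs.
def pvSkipReasons : PySem.Dict String String := ⟨[
  (".jpg", "Unsupported file type (image)"),
  (".jpeg", "Unsupported file type (image)"),
  (".png", "Unsupported file type (image)"),
  (".gif", "Unsupported file type (image)"),
  (".bmp", "Unsupported file type (image)"),
  (".svg", "Unsupported file type (image)"),
  (".ico", "Unsupported file type (image)"),
  (".webp", "Unsupported file type (image)"),
  (".tiff", "Unsupported file type (image)"),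
  (".tif", "Unsupported file type (image)"),
  (".heic", "Unsupported file type (image)"),
  (".heif", "Unsupported file type (image)"),
  (".raw", "Unsupported file type (image)"),
  (".cr2", "Unsupported file type (image)"),
  (".nef", "Unsupported file type (image)"),
  (".arw", "Unsupported file type (image)"),
  (".psd", "Unsupported file type (image)"),
  (".mp4", "Unsupported file type (video)"),
  (".avi", "Unsupported file type (video)"),
  (".mov", "Unsupported file type (video)"),
  (".wmv", "Unsupported file type (video)"),
  (".mkv", "Unsupported file type (video)"),
  (".webm", "Unsupported file type (video)"),
  (".flv", "Unsupported file type (video)"),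
  (".m4v", "Unsupported file type (video)"),
  (".mp3", "Unsupported file type (audio)"),
  (".wav", "Unsupported file type (audio)"),
  (".ogg", "Unsupported file type (audio)"),
  (".flac", "Unsupported file type (audio)"),
  (".aac", "Unsupported file type (audio)"),
  (".wma", "Unsupported file type (audio)"),
  (".m4a", "Unsupported file type (audio)"),
  (".zip", "Unsupported file type (.zip)"),
  (".rar", "Unsupported file type (.rar)"),
  (".7z", "Unsupported file type (.7z)"),
  (".tar", "Unsupported file type (.tar)"),
  (".gz", "Unsupported file type (.gz)"),
  (".bz2", "Unsupported file type (.bz2)"),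
  (".exe", "Unsupported file type (.exe)"),
  (".dll", "Unsupported file type (.dll)"),
  (".msi", "Unsupported file type (.msi)"),
  (".bin", "Unsupported file type (.bin)"),
  (".iso", "Unsupported file type (.iso)"),
  (".ttf", "Unsupported file type (.ttf)"),
  (".otf", "Unsupported file type (.otf)"),
  (".woff", "Unsupported file type (.woff)"),
  (".woff2", "Unsupported file type (.woff2)")]⟩

def unsupported_file_reason_py_alt (filename : String) : Option String :=
  let name := PySem.Str.lower filename
  let i := PySem.Str.rfind name "."
  if i < 0 then none
  else PySem.Dict.get? pvSkipReasons (PySem.Str.slice name (some i) none)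

-- ===== PRECONDITION & SPEC =====
def Spec_unsupported_file_reason_py (filename : String) (out : Option String) : Prop := out = unsupported_file_reason_py_alt filename
instance (filename : String) (out : Option String) : Decidable (Spec_unsupported_file_reason_py filename out) := by unfold Spec_unsupported_file_reason_py; infer_instance

-- ===== CLAIM (what is proved, stated in full; the proofs are below) =====
def Claim_equal_unsupported_file_reason_py : Prop := ∀ (filename : String), Dom_unsupported_file_reason_py filename → Spec_unsupported_file_reason_py filename (unsupported_file_reason_py filename)

-- ===== LEMMAS AND PROOFS =====

-- ['.'] is a prefix of xs iff xs starts with '.'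
theorem pv_isPrefixOf_dot (xs : List Char) : (['.'].isPrefixOf xs) = (xs.head? == some '.') := by
  cases xs with
  | nil => rfl
  | cons a t =>
    by_cases h : a = '.' <;> simp [List.isPrefixOf, h, eq_comm]

-- rfind.go returns -1 when no position ≤ k holds a dot
theorem pv_go_none (l : List Char) (k : Nat) (h : ∀ j, j ≤ k → l[j]? ≠ some '.') :
    PySem.Chars.rfind.go l ['.'] k = -1 := by
  induction k with
  | zero =>
    have h0 := h 0 (Nat.le_refl 0)
    simp only [PySem.Chars.rfind.go, pv_isPrefixOf_dot]
    simp only [List.head?_eq_getElem?] at *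
    simp [h0]
  | succ n ih =>
    have hn := h (n + 1) (Nat.le_refl _)
    simp only [PySem.Chars.rfind.go, pv_isPrefixOf_dot, List.head?_drop]
    simp only [beq_iff_eq, if_neg hn]
    exact ih (fun j hj => h j (Nat.le_succ_of_le hj))

-- rfind.go returns the greatest dot position ≤ k
theorem pv_go_eq (l : List Char) (m k : Nat) (hm : m ≤ k) (hdot : l[m]? = some '.')
    (hup : ∀ j, m < j → j ≤ k → l[j]? ≠ some '.') :
    PySem.Chars.rfind.go l ['.'] k = (m : Int) := by
  induction k with
  | zero =>
    interval_cases m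
    simp only [PySem.Chars.rfind.go, pv_isPrefixOf_dot]
    simp only [List.head?_eq_getElem?] at *
    simp [hdot]
  | succ n ih =>
    by_cases hmn : m = n + 1
    · subst hmn
      simp only [PySem.Chars.rfind.go, pv_isPrefixOf_dot, List.head?_drop]
      simp [hdot]
    · have hm' : m ≤ n := by omega
      have hne := hup (n + 1) (by omega) (Nat.le_refl _)
      simp only [PySem.Chars.rfind.go, pv_isPrefixOf_dot, List.head?_drop]
      simp only [beq_iff_eq, if_neg hne]
      exact ih hm' (fun j h1 h2 => hup j h1 (Nat.le_succ_of_le h2))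

-- no dot at all → rfind = -1
theorem pv_rfind_neg (l : List Char) (h : '.' ∉ l) : PySem.Chars.rfind l ['.'] = -1 := by
  unfold PySem.Chars.rfind
  exact pv_go_none l l.length (fun j _ hj => h (List.mem_of_getElem? hj))

def pvLastDot (l : List Char) : Nat := Nat.findGreatest (fun j => l[j]? = some '.') l.length

theorem pv_lastDot_dot (l : List Char) (h : '.' ∈ l) : l[pvLastDot l]? = some '.' := by
  obtain ⟨i, hi, hv⟩ := List.mem_iff_getElem.mp h
  exact Nat.findGreatest_spec (P := fun j => l[j]? = some '.') (Nat.le_of_lt hi)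
    (by simp [List.getElem?_eq_getElem hi, hv])

theorem pv_lastDot_up (l : List Char) (j : Nat) (hj : pvLastDot l < j) : l[j]? ≠ some '.' := by
  by_cases hlen : j ≤ l.length
  · exact Nat.findGreatest_is_greatest hj hlen
  · intro hc
    rw [List.getElem?_eq_none (by omega : l.length ≤ j)] at hc
    simp at hc

theorem pv_rfind_pos (l : List Char) (h : '.' ∈ l) :
    PySem.Chars.rfind l ['.'] = (pvLastDot l : Int) := by
  unfold PySem.Chars.rfind
  have hdot := pv_lastDot_dot l h
  have hlt : pvLastDot l < l.length := by
    by_contra hc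
    rw [List.getElem?_eq_none (by omega : l.length ≤ pvLastDot l)] at hdot
    simp at hdot
  exact pv_go_eq l (pvLastDot l) l.length (Nat.le_of_lt hlt) hdot
    (fun j h1 _ => pv_lastDot_up l j h1)

-- every extension starts with '.' and has no further dot
theorem pv_ext_shape : ∀ e ∈ pvUnsupportedExtensions,
    e.toList.head? = some '.' ∧ (∀ c ∈ e.toList.tail, c ≠ '.') := by
  intro e he
  fin_cases he <;> exact ⟨by simp, by simp⟩

-- name ends with such an extension iff the last-dot suffix IS that extension
theorem pv_ends_iff (l : List Char) (m : Nat) (hdot : l[m]? = some '.')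
    (hup : ∀ j, m < j → l[j]? ≠ some '.') (e : List Char)
    (he : e.head? = some '.') (ht : ∀ c ∈ e.tail, c ≠ '.') :
    (e <:+ l ↔ l.drop m = e) := by
  constructor
  · rintro ⟨p, rfl⟩
    have hpl : (p ++ e)[p.length]? = some '.' := by
      rw [List.getElem?_append_right (Nat.le_refl _)]
      simpa [← List.head?_eq_getElem?] using he
    have h1 : p.length ≤ m := by
      by_contra hc
      exact hup p.length (by omega) hpl
    have h2 : m ≤ p.length := by
      by_contra hc
      rw [Nat.not_le] at hc
      have hme : (p ++ e)[m]? = e[m - p.length]? := List.getElem?_append_right (by omega)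
      rw [hme] at hdot
      obtain ⟨hlt, hval⟩ := List.getElem?_eq_some_iff.mp hdot
      have hmem : e[m - p.length] ∈ e.tail := by
        have : e[m - p.length] ∈ e.drop 1 := by
          rw [List.mem_iff_getElem]
          exact ⟨m - p.length - 1, by simp; omega, by rw [List.getElem_drop]; congr 1; omega⟩
        simpa [List.drop_one] using this
      exact ht _ hmem hval
    have hmp : m = p.length := Nat.le_antisymm h2 h1
    subst hmp
    exact List.drop_left
  · intro h
    rw [← h]
    exact List.drop_suffix m l

-- a String equals ofList suf iff its character list is suf
theorem pv_beq_ofList (e : String) (suf : List Char) :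
    (e == String.ofList suf) = decide (suf = e.toList) := by
  by_cases h : suf = e.toList
  · subst h
    simp
  · have hne : e ≠ String.ofList suf := by
      intro hc
      exact h (by rw [hc]; simp)
    simp [h, beq_eq_false_iff_ne, hne]

-- A's scan over a list of extensions, when each match is equivalent to key equality,
-- is the association-list lookup of the key
theorem pv_scan_eq_find (name : String) (suf : List Char) (exts : List String)
    (hiff : ∀ e ∈ exts, PySem.Str.endswith name e = true ↔ suf = e.toList) :
    pvScanA name exts =
      Option.map (fun p => p.2)
        (List.find? (fun p => p.1 == String.ofList suf) (exts.map (fun e => (e, pvCategory e)))) := by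
  induction exts with
  | nil => rfl
  | cons e rest ih =>
    have hcond : PySem.Str.endswith name e = decide (suf = e.toList) := by
      by_cases h : suf = e.toList
      · rw [(hiff e (by simp)).mpr h, h]
        simp
      · simp only [h, decide_false]
        cases hb : PySem.Str.endswith name e
        · rfl
        · exact absurd ((hiff e (by simp)).mp hb) h
    have hkey : (e == String.ofList suf) = decide (suf = e.toList) := pv_beq_ofList e suf
    simp only [pvScanA, List.map_cons, List.find?_cons, hcond, hkey]
    by_cases h : suf = e.toList
    · simp [h]
    · simp only [h, decide_false, Bool.false_eq_true, if_false]
      exact ih (fun e' he' => hiff e' (by simp [he']))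

-- the scan returns none when no extension matches
theorem pv_scan_none_of (name : String) (exts : List String)
    (hall : ∀ e ∈ exts, PySem.Str.endswith name e = false) : pvScanA name exts = none := by
  induction exts with
  | nil => rfl
  | cons e rest ih =>
    simp only [pvScanA, hall e (by simp), Bool.false_eq_true, if_false]
    exact ih (fun e' he' => hall e' (by simp [he']))

-- B's flat dict literal is exactly A's extension list paired with A's category strings
theorem pv_dict_items :
    pvSkipReasons.items = pvUnsupportedExtensions.map (fun e => (e, pvCategory e)) := by decide

theorem pv_main (filename : String) :
    unsupported_file_reason_py filename = unsupported_file_reason_py_alt filename := by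
  unfold unsupported_file_reason_py unsupported_file_reason_py_alt
  set name := PySem.Str.lower filename with hname
  show pvScanA name pvUnsupportedExtensions =
    (if PySem.Str.rfind name "." < 0 then none
     else PySem.Dict.get? pvSkipReasons
       (PySem.Str.slice name (some (PySem.Str.rfind name ".")) none))
  set l := name.toList with hl
  have hrf : PySem.Str.rfind name "." = PySem.Chars.rfind l ['.'] := rfl
  by_cases hd : '.' ∈ l
  · -- a dot exists: rfind points at the last dot, scan ↔ dict lookup of the suffix
    have hdot := pv_lastDot_dot l hd
    have hup := pv_lastDot_up l
    rw [hrf, pv_rfind_pos l hd]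
    rw [if_neg (by omega : ¬ ((pvLastDot l : Int) < 0))]
    have hslice : (PySem.Str.slice name (some ((pvLastDot l : Nat) : Int)) none) =
        String.ofList (l.drop (pvLastDot l)) := by
      apply String.ext
      simp [PySem.Str.toList_slice, PySem.Chars.slice_eq_listSlice,
        PySem.List.slice_from _ (Int.natCast_nonneg (pvLastDot l))]
      rfl
    rw [hslice]
    have hiff : ∀ e ∈ pvUnsupportedExtensions,
        PySem.Str.endswith name e = true ↔ l.drop (pvLastDot l) = e.toList := by
      intro e he
      obtain ⟨hh, htl⟩ := pv_ext_shape e he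
      rw [PySem.Str.endswith_eq, PySem.Chars.endswith_iff]
      exact pv_ends_iff l (pvLastDot l) hdot hup e.toList hh htl
    rw [pv_scan_eq_find name (l.drop (pvLastDot l)) pvUnsupportedExtensions hiff]
    unfold PySem.Dict.get?
    rw [pv_dict_items]
  · -- no dot: rfind is -1 → B returns none; no extension can match → A returns none
    rw [hrf, pv_rfind_neg l hd]
    rw [if_pos (by omega : (-1 : Int) < 0)]
    apply pv_scan_none_of
    intro e he
    cases hb : PySem.Str.endswith name e
    · rfl
    · exfalso
      rw [PySem.Str.endswith_eq] at hb
      obtain ⟨p, hp⟩ := (PySem.Chars.endswith_iff _ _).mp hb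
      have hdote : '.' ∈ e.toList := List.mem_of_mem_head? (pv_ext_shape e he).1
      exact hd (by rw [hl, ← hp]; exact List.mem_append_right p hdote)

-- ===== VERDICT (by name: the statement is the Claim_ definition above) =====
theorem unsupported_file_reason_py_spec : Claim_equal_unsupported_file_reason_py := by
  intro filename _
  unfold Spec_unsupported_file_reason_py
  exact pv_main filename
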